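-- pv_equiv track=rewrite | github.com/junha6316/Algorithm | kakao_whatisthenamejustbefore.py | transform
-- ===== SOURCE A (Python) =====
-- def transform(m):
--     note = ['C#', 'D#', 'F#', 'A#', 'G#', 'C', 'D', 'E', 'F', 'G', 'A', 'B']
--     note_dic = {note[i]: chr(65 + i) for i in range(12)}
--     result=''
--     for idx, note in enumerate(m):
--         if m[idx] == '#': pass
--         elif idx < len(m)-1 and m[idx+1] == '#':
--             result += note_dic[m[idx:idx+2]]
--         else:
--             result += note_dic[m[idx]]
--
--     return result
-- ===== SOURCE B (Python) =====
-- def transform(m):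
--     note_dic = {'C#': 'A', 'D#': 'B', 'F#': 'C', 'A#': 'D', 'G#': 'E',
--                 'C': 'F', 'D': 'G', 'E': 'H', 'F': 'I', 'G': 'J', 'A': 'K', 'B': 'L'}
--     out = []
--     sharp = False
--     for c in reversed(m):
--         if c == '#':
--             sharp = True
--         else:
--             out.append(note_dic[c + '#'] if sharp else note_dic[c])
--             sharp = False
--     out.reverse()
--     return ''.join(out)
-- ===== Notes on version B (the rewrite author's own statement) =====
-- stated objective: alternative
-- what changed: Replaces A's index loop with lookahead (m[idx+1], slicing, skip-pass) by a single right-to-left scan carrying a boolean look-behind flag over a literal note table, collecting output in a list that is reversed and joined.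
import Mathlib
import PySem

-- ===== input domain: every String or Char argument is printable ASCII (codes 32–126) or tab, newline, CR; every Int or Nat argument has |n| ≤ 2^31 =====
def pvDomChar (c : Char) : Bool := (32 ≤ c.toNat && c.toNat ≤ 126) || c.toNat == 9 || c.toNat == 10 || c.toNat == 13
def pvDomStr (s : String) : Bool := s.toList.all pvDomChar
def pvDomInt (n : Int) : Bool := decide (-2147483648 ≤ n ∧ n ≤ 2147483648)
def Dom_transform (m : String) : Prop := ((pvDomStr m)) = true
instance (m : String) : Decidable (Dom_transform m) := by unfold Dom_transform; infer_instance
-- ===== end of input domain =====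

-- B replaces A's per-index loop with lookahead by a single right-to-left scan carrying a boolean look-behind flag (alternative decomposition, same cost).

-- ===== PORT A =====
-- note list and the dict comprehension {note[i]: chr(65+i) for i in range(12)}
def noteA : List (List Char) :=
  [['C','#'],['D','#'],['F','#'],['A','#'],['G','#'],['C'],['D'],['E'],['F'],['G'],['A'],['B']]

def noteDicA : PySem.Dict (List Char) (List Char) :=
  (PySem.List.pyRange 0 12 1).foldl
    (fun d i => d.insert (PySem.List.pyGetD noteA i []) [Char.ofNat (65 + i.toNat)])
    PySem.Dict.empty

-- the loop body of A; note_dic[...] on a missing key is a KeyError, excluded by Pre_transform (port uses .getD [] there)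
def stepA (cs : List Char) (result : List Char) (p : Int × Char) : List Char :=
  if PySem.List.pyGet? cs p.1 = some '#' then result
  else if p.1 < (cs.length : Int) - 1 ∧ PySem.List.pyGet? cs (p.1 + 1) = some '#' then
    result ++ (noteDicA.get? (PySem.List.slice cs (some p.1) (some (p.1 + 2)))).getD []
  else
    result ++ (noteDicA.get? [PySem.List.pyGetD cs p.1 ' ']).getD []

def transform (m : String) : String :=
  String.mk ((PySem.List.enumerate m.toList 0).foldl (stepA m.toList) [])

-- ===== PORT B =====
-- literal dict of Source B
def noteDicB : PySem.Dict (List Char) (List Char) :=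
  (((((((((((PySem.Dict.empty.insert
    ['C','#'] ['A']).insert ['D','#'] ['B']).insert ['F','#'] ['C']).insert
    ['A','#'] ['D']).insert ['G','#'] ['E']).insert ['C'] ['F']).insert
    ['D'] ['G']).insert ['E'] ['H']).insert ['F'] ['I']).insert
    ['G'] ['J']).insert ['A'] ['K']).insert ['B'] ['L']

-- the loop body of Source B (state = (out, flag)); note_dic[...] on a missing key is a KeyError, excluded by Pre_transform
def stepB (acc : List (List Char) × Bool) (c : Char) : List (List Char) × Bool :=
  if c = '#' then (acc.1, true)
  else (acc.1 ++ [(noteDicB.get? (if acc.2 then [c, '#'] else [c])).getD []], false)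

def transform_alt (m : String) : String :=
  let st := m.toList.reverse.foldl stepB ([], false)
  String.mk (PySem.Chars.join [] st.1.reverse)

-- ===== PRECONDITION & SPEC =====
-- Pre_ excludes exactly the inputs on which both Pythons raise KeyError (a character that is not a
-- note name or sharp sign, or a note with no sharp variant immediately followed by a sharp sign);
-- A returns normally on every string Pre_ admits.
def Pre_transform (m : String) : Prop :=
  (m.toList.all (fun c => c ∈ (['A','B','C','D','E','F','G','#'] : List Char)) &&
   (m.toList.zip m.toList.tail).all (fun p => !(p.2 == '#' && (p.1 == 'E' || p.1 == 'B')))) = true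

instance (m : String) : Decidable (Pre_transform m) := by unfold Pre_transform; infer_instance

def pvWitness_transform : String := "CC#BDD#"

def Spec_transform (m : String) (out : String) : Prop := out = transform_alt m
instance (m : String) (out : String) : Decidable (Spec_transform m out) := by unfold Spec_transform; infer_instance

-- ===== CLAIM (what is proved, stated in full; the proofs are below) =====
def Claim_equal_transform : Prop := ∀ (m : String), Dom_transform m → Pre_transform m → Spec_transform m (transform m)

-- ===== LEMMAS AND PROOFS =====

-- canonical token encoding both loops compute
def tokS (c : Char) : List Char := (noteDicA.get? [c, '#']).getD []
def tokN (c : Char) : List Char := (noteDicA.get? [c]).getD []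

def encode : List Char → List (List Char)
  | [] => []
  | c :: s =>
    if c = '#' then encode s
    else if s.head? = some '#' then tokS c :: encode s.tail
    else tokN c :: encode s
termination_by cs => cs.length
decreasing_by all_goals (simp [List.length_tail]; try omega)

lemma noteDicB_eq : noteDicB = noteDicA := by decide

lemma join_nil_flatten (ps : List (List Char)) : PySem.Chars.join [] ps = ps.flatten := by
  unfold PySem.Chars.join
  simp [List.intercalate]
  induction ps with
  | nil => rfl
  | cons a ps ih => cases ps <;> simp_all [List.intersperse]

lemma foldA_encode (cs : List Char) : ∀ (n k : Nat) (acc : List Char),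
    cs.length ≤ k + n →
    ((PySem.List.enumerate cs 0).drop k).foldl (stepA cs) acc
      = acc ++ (encode (cs.drop k)).flatten := by
  intro n
  induction n with
  | zero =>
    intro k acc h
    have h1 : (PySem.List.enumerate cs 0).drop k = [] := by
      apply List.drop_eq_nil_of_le; rw [PySem.List.length_enumerate]; omega
    have h2 : cs.drop k = [] := List.drop_eq_nil_of_le (by omega)
    simp [h1, h2, encode]
  | succ n ih =>
    intro k acc h
    by_cases hk : cs.length ≤ k
    · have h1 : (PySem.List.enumerate cs 0).drop k = [] := by
        apply List.drop_eq_nil_of_le; rw [PySem.List.length_enumerate]; omega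
      have h2 : cs.drop k = [] := List.drop_eq_nil_of_le (by omega)
      simp [h1, h2, encode]
    · push_neg at hk
      have hlenum : k < (PySem.List.enumerate cs 0).length := by
        rw [PySem.List.length_enumerate]; exact hk
      have hence : (PySem.List.enumerate cs 0).drop k
          = ((0 : Int) + (k : Int), cs[k]) :: (PySem.List.enumerate cs 0).drop (k + 1) := by
        rw [List.drop_eq_getElem_cons hlenum]
        congr 1
        exact PySem.List.getElem_enumerate cs 0 k hlenum
      have hcs : cs.drop k = cs[k] :: cs.drop (k + 1) := List.drop_eq_getElem_cons hk
      have hget : PySem.List.pyGet? cs ((0 : Int) + (k : Int)) = some cs[k] := by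
        rw [zero_add, PySem.List.pyGet?_natCast, List.getElem?_eq_getElem hk]
      rw [hence, List.foldl_cons]
      by_cases hsharp : cs[k] = '#'
      · have hstep : stepA cs acc ((0 : Int) + (k : Int), cs[k]) = acc := by
          unfold stepA; rw [if_pos (by rw [hget, hsharp])]
        rw [hstep, ih (k + 1) acc (by omega), hcs, hsharp]
        simp [encode]
      · by_cases hnext : k + 1 < cs.length ∧ cs[k + 1]? = some '#'
        · obtain ⟨hnl, hnv⟩ := hnext
          have hnv' : cs[k + 1] = '#' := by
            rw [List.getElem?_eq_getElem hnl] at hnv; exact Option.some.inj hnv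
          have hd : cs.drop (k + 1) = '#' :: cs.drop (k + 2) := by
            rw [List.drop_eq_getElem_cons hnl, hnv']
          have hslice : PySem.List.slice cs (some ((0 : Int) + (k : Int)))
              (some ((0 : Int) + (k : Int) + 2)) = [cs[k], '#'] := by
            have h2 : ((k : Int) + 2) = ((k + 2 : Nat) : Int) := by push_cast; ring
            rw [zero_add, h2, PySem.List.slice_natCast]
            rw [show k + 2 - k = 2 by omega, hcs, hd]
            rfl
          have hstep : stepA cs acc ((0 : Int) + (k : Int), cs[k])
              = acc ++ (noteDicA.get? [cs[k], '#']).getD [] := by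
            unfold stepA
            rw [if_neg (by rw [hget]; simp [hsharp])]
            rw [if_pos ⟨by push_cast; omega,
              by rw [show ((0 : Int) + (k : Int) + 1) = ((k + 1 : Nat) : Int) by push_cast; ring,
                     PySem.List.pyGet?_natCast, hnv]⟩]
            rw [hslice]
          rw [hstep, ih (k + 1) _ (by omega), hcs]
          rw [show encode (cs[k] :: cs.drop (k + 1))
              = tokS cs[k] :: encode (cs.drop (k + 1)).tail by
            rw [encode]; rw [if_neg hsharp, if_pos (by rw [hd]; rfl)]]
          rw [hd]
          simp [encode, tokS]
        · have hnots : cs[k + 1]? ≠ some '#' := by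
            rcases Nat.lt_or_ge (k + 1) cs.length with hl | hl
            · intro hcon; exact hnext ⟨hl, hcon⟩
            · rw [List.getElem?_eq_none hl]; simp
          have hstep : stepA cs acc ((0 : Int) + (k : Int), cs[k])
              = acc ++ (noteDicA.get? [cs[k]]).getD [] := by
            unfold stepA
            rw [if_neg (by rw [hget]; simp [hsharp])]
            rw [if_neg (by
              rintro ⟨hlt, hv⟩
              rw [show ((0 : Int) + (k : Int) + 1) = ((k + 1 : Nat) : Int) by push_cast; ring,
                  PySem.List.pyGet?_natCast] at hv
              exact hnots hv)]
            rw [zero_add, PySem.List.pyGetD_natCast, List.getD_eq_getElem _ _ hk]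
          have hhead : (cs.drop (k + 1)).head? ≠ some '#' := by
            rw [List.head?_drop]; exact hnots
          rw [hstep, ih (k + 1) _ (by omega), hcs]
          rw [show encode (cs[k] :: cs.drop (k + 1))
              = tokN cs[k] :: encode (cs.drop (k + 1)) by
            rw [encode]; rw [if_neg hsharp, if_neg hhead]]
          simp [tokN]

lemma foldrB_encode (cs : List Char) :
    cs.foldr (fun c acc => stepB acc c) ([], false)
      = ((encode cs).reverse, decide (cs.head? = some '#')) := by
  induction cs with
  | nil => simp [encode]
  | cons c s ih =>
    rw [List.foldr_cons, ih]
    by_cases hc : c = '#'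
    · subst hc; simp [stepB, encode]
    · by_cases hs : s.head? = some '#'
      · obtain ⟨t, rfl⟩ : ∃ t, s = '#' :: t := by
          cases s with
          | nil => simp at hs
          | cons a t => simp at hs; exact ⟨t, by rw [hs]⟩
        simp [stepB, hc, encode, noteDicB_eq, tokS]
      · simp [stepB, hc, hs, encode, noteDicB_eq, tokN]

lemma transformA_eq (m : String) : transform m = String.mk ((encode m.toList).flatten) := by
  unfold transform
  have := foldA_encode m.toList m.toList.length 0 [] (by omega)
  simp only [List.drop_zero, List.nil_append] at this
  exact congrArg String.mk this

lemma transformB_eq (m : String) : transform_alt m = String.mk ((encode m.toList).flatten) := by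
  unfold transform_alt
  rw [List.foldl_reverse, foldrB_encode]
  simp [join_nil_flatten]

-- ===== VERDICT (by name: the statement is the Claim_ definition above) =====
theorem transform_spec : Claim_equal_transform := by
  intro m _ _
  unfold Spec_transform
  rw [transformA_eq, transformB_eq]
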